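-- pv_equiv track=rewrite | github.com/JLee21/tech-prep | code-problems/search-problems/box-roi.py | findROI
-- ===== SOURCE A (Python) =====
-- def findROI(grid):
--     for row in range(len(grid)):
--         for col in range(len(grid[0])):
--             coords = {}
--             if grid[row][col] == 0:
--                 coords['tl'] = (row, col)
--                 coords['br'] = (row, col)
--                 coords = searchDFS(row, col, grid, coords)
--                 return coords['tl'][0], coords['tl'][1], coords['br'][0], coords['br'][1]
--     return None
--
-- def searchDFS(row, col, grid, coords):
--     # check bounds
--     if row < 0 or row > len(grid)-1:
--         return
--     if col < 0 or col > len(grid[0])-1: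
--         return
--     # check if visited
--     if grid[row][col] == 1:
--         return
--
--     # mark as visited
--     grid[row][col] = 1
--
--     # cache the possible bottom right coord
--     if row+col > coords['br'][0]+coords['br'][1]:
--         coords['br'] = (row, col)
--
--     # continue to search nearest neighbors
--     searchDFS(row-1, col, grid, coords)  # left
--     searchDFS(row+1, col, grid, coords)  # right
--     searchDFS(row, col+1, grid, coords)  # down
--     searchDFS(row, col-1, grid, coords)  # up
--
--     # if we reached this far, we have exhausted the DFS search
--     return coords
-- ===== SOURCE B (Python) =====
-- def findROI(grid):
--     # Iterative flood fill with an explicit stack instead of A's recursive DFS.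
--     # Mutates grid in place (marks visited cells 1), like A.
--     for row in range(len(grid)):
--         for col in range(len(grid[0])):
--             if grid[row][col] == 0:
--                 tl = (row, col)
--                 br = (row, col)
--                 stack = [(row, col)]
--                 while stack:
--                     r, c = stack.pop()
--                     if r < 0 or r >= len(grid) or c < 0 or c >= len(grid[0]):
--                         continue
--                     if grid[r][c] == 1:
--                         continue
--                     grid[r][c] = 1
--                     if r + c > br[0] + br[1]:
--                         br = (r, c)
--                     # push in reverse of A's recursion order so pops match its pre-order
--                     stack.extend([(r, c - 1), (r, c + 1), (r + 1, c), (r - 1, c)])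
--                 return tl[0], tl[1], br[0], br[1]
--     return None
-- ===== Notes on version B (the rewrite author's own statement) =====
-- stated objective: alternative
-- what changed: A's recursive searchDFS (plus a coords dict threaded through the recursion) is replaced by an iterative flood fill over an explicit stack seeded with the start cell, with neighbors pushed in reverse of A's recursion order so pops reproduce its pre-order; the outer first-zero scan is kept.
-- outside the precondition, e.g. on findROI([[0, 1], [1]]): A returns (0, 0, 0, 0), B returns (0, 0, 0, 0)
import Mathlib
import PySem

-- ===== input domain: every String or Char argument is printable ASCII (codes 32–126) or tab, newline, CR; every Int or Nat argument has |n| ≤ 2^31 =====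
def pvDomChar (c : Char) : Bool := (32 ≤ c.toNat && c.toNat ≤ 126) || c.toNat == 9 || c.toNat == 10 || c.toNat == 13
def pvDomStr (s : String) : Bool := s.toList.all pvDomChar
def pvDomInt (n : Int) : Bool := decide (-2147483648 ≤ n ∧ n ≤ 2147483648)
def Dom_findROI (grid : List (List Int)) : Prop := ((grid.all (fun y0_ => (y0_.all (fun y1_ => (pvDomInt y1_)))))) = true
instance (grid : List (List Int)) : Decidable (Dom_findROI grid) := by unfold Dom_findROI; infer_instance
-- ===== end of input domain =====

-- B replaces A's recursive DFS by an iterative explicit-stack flood fill (neighbors pushed in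
-- reverse of A's recursion order so pops reproduce its pre-order); return values are proved equal;
-- both Pythons mutate `grid` in place identically (visited cells set to 1).

-- ===== PORT A =====

-- number of grid entries ≠ 1 (each DFS level first marks one such cell; used as fuel bound for A's
-- recursion and as termination measure for B's loop)
def pvCnt (g : List (List Int)) : Nat := (g.map (fun r => r.countP (fun x => x != 1))).sum

def pvFuel (g : List (List Int)) : Nat := (g.map List.length).sum + 1

-- grid[row][col], totalized with default 1 ("visited"); exact under Pre_ (in range there)
def pvRead (g : List (List Int)) (r c : Int) : Int :=
  PySem.List.pyGetD (PySem.List.pyGetD g r []) c 1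

-- grid[row][col] = 1 (in-place in Python; here the updated grid is returned)
def pvMark (g : List (List Int)) (r c : Int) : List (List Int) :=
  PySem.List.pySetD g r (PySem.List.pySetD (PySem.List.pyGetD g r []) c 1)

-- searchDFS: state = (grid, coords) with coords = (tl, br); fuel-guarded recursion
-- (pvFuel always suffices, see lemma pvCnt_le_sumLen below)
def dfsA : Nat → Int → Int → List (List Int) → ((Int × Int) × (Int × Int)) →
    List (List Int) × ((Int × Int) × (Int × Int))
  | 0, _, _, g, c => (g, c)
  | f + 1, row, col, g, c =>
    if row < 0 ∨ row > (g.length : Int) - 1 then (g, c)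
    else if col < 0 ∨ col > ((PySem.List.pyGetD g 0 []).length : Int) - 1 then (g, c)
    else if pvRead g row col = 1 then (g, c)
    else
      let g1 := pvMark g row col
      let c1 := if row + col > c.2.1 + c.2.2 then (c.1, (row, col)) else c
      let s1 := dfsA f (row - 1) col g1 c1
      let s2 := dfsA f (row + 1) col s1.1 s1.2
      let s3 := dfsA f row (col + 1) s2.1 s2.2
      dfsA f row (col - 1) s3.1 s3.2

def scanColsA (g : List (List Int)) (row : Int) : List Int → Option (Int × Int × Int × Int)
  | [] => none
  | col :: rest =>
    if pvRead g row col = 0 then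
      let st := dfsA (pvFuel g) row col g ((row, col), (row, col))
      some (st.2.1.1, st.2.1.2, st.2.2.1, st.2.2.2)
    else scanColsA g row rest

def scanRowsA (g : List (List Int)) : List Int → Option (Int × Int × Int × Int)
  | [] => none
  | row :: rest =>
    match scanColsA g row (PySem.List.pyRange 0 ((PySem.List.pyGetD g 0 []).length : Int) 1) with
    | some r => some r
    | none => scanRowsA g rest

def findROI (grid : List (List Int)) : Option (Int × Int × Int × Int) :=
  scanRowsA grid (PySem.List.pyRange 0 (grid.length : Int) 1)

-- ===== PORT B =====

-- lemmas cited by loopB's termination proof (hence placed above the port)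
theorem countP_set_one_lt (L : List Int) (k : Nat) (hk : k < L.length) (h : L[k] ≠ 1) :
    (L.set k 1).countP (fun x => x != 1) < L.countP (fun x => x != 1) := by
  induction L generalizing k with
  | nil => simp at hk
  | cons a t ih =>
    cases k with
    | zero =>
      have ha : (a != 1) = true := by simpa using h
      simp only [List.set_cons_zero, List.countP_cons, ha]
      simp
    | succ m =>
      have := ih m (by simpa using hk) (by simpa using h)
      simp only [List.set_cons_succ, List.countP_cons]
      exact Nat.add_lt_add_right this _

theorem pvCnt_set_lt (g : List (List Int)) (k : Nat) (x : List Int) (hk : k < g.length)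
    (h : x.countP (fun a => a != 1) < (g[k]).countP (fun a => a != 1)) :
    pvCnt (g.set k x) < pvCnt g := by
  induction g generalizing k with
  | nil => simp at hk
  | cons a t ih =>
    cases k with
    | zero =>
      simp only [List.getElem_cons_zero] at h
      simp only [List.set_cons_zero, pvCnt, List.map_cons, List.sum_cons]
      exact Nat.add_lt_add_right h _
    | succ m =>
      have := ih m (by simpa using hk) (by simpa using h)
      simp only [List.set_cons_succ, pvCnt, List.map_cons, List.sum_cons] at this ⊢
      exact Nat.add_lt_add_left this _

theorem pvCnt_mark_lt (g : List (List Int)) (r c : Int) (hr0 : 0 ≤ r) (hrl : r < (g.length : Int))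
    (hc0 : 0 ≤ c) (hv : pvRead g r c ≠ 1) : pvCnt (pvMark g r c) < pvCnt g := by
  have hrn : r.toNat < g.length := by omega
  have hrow : PySem.List.pyGetD g r [] = g[r.toNat] :=
    PySem.List.pyGetD_eq_getElem _ _ hr0 hrl
  have hcn : c.toNat < (g[r.toNat]).length := by
    by_contra hcl
    apply hv
    have hnone : PySem.List.pyGet? (g[r.toNat]) c = none :=
      (PySem.List.pyGet?_eq_none_iff _ _).mpr (fun hIn => absurd hIn.2 (by omega))
    rw [pvRead, hrow]
    exact PySem.List.pyGetD_of_none _ _ _ hnone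
  have hvv : (g[r.toNat])[c.toNat] ≠ 1 := by
    intro h; apply hv
    rw [pvRead, hrow, PySem.List.pyGetD_eq_getElem _ _ hc0 (by omega)]
    exact h
  have hmark : pvMark g r c = g.set r.toNat ((g[r.toNat]).set c.toNat 1) := by
    rw [pvMark, hrow, PySem.List.pySetD_of_nonneg _ _ hr0, PySem.List.pySetD_of_nonneg _ _ hc0]
  rw [hmark]
  exact pvCnt_set_lt g r.toNat _ hrn (countP_set_one_lt _ c.toNat hcn hvv)

-- while stack: pop; skip out-of-bounds / visited; mark, update br, push reversed neighbors
def loopB (stack : List (Int × Int)) (g : List (List Int)) (br : Int × Int) :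
    List (List Int) × (Int × Int) :=
  match stack with
  | [] => (g, br)
  | (r, c) :: rest =>
    if r < 0 ∨ r ≥ (g.length : Int) ∨ c < 0 ∨ c ≥ ((PySem.List.pyGetD g 0 []).length : Int) then
      loopB rest g br
    else if pvRead g r c = 1 then loopB rest g br
    else
      loopB ((r - 1, c) :: (r + 1, c) :: (r, c + 1) :: (r, c - 1) :: rest) (pvMark g r c)
        (if r + c > br.1 + br.2 then (r, c) else br)
  termination_by (pvCnt g, stack.length)
  decreasing_by
  · exact Prod.Lex.right _ (Nat.lt_succ_self _)
  · exact Prod.Lex.right _ (Nat.lt_succ_self _)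
  · rename_i hb hv
    exact Prod.Lex.left _ _ (pvCnt_mark_lt g r c (by omega) (by omega) (by omega) hv)

def scanColsB (g : List (List Int)) (row : Int) : List Int → Option (Int × Int × Int × Int)
  | [] => none
  | col :: rest =>
    if pvRead g row col = 0 then
      let st := loopB [(row, col)] g (row, col)
      some (row, col, st.2.1, st.2.2)
    else scanColsB g row rest

def scanRowsB (g : List (List Int)) : List Int → Option (Int × Int × Int × Int)
  | [] => none
  | row :: rest =>
    match scanColsB g row (PySem.List.pyRange 0 ((PySem.List.pyGetD g 0 []).length : Int) 1) with
    | some r => some r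
    | none => scanRowsB g rest

def findROI_alt (grid : List (List Int)) : Option (Int × Int × Int × Int) :=
  scanRowsB grid (PySem.List.pyRange 0 (grid.length : Int) 1)

-- ===== PRECONDITION & SPEC =====
-- Pre_ excludes ragged grids (some row shorter than the first row): there the Pythons raise
-- IndexError whenever the scan or the flood fill reads a missing cell; on a few such grids A still
-- returns (the first zero comes early enough) — see the cite in claim.json.
def Pre_findROI (grid : List (List Int)) : Prop :=
  ∀ r ∈ grid, (grid.headD []).length ≤ r.length
instance (grid : List (List Int)) : Decidable (Pre_findROI grid) := by
  unfold Pre_findROI; infer_instance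

def pvWitness_findROI : List (List Int) := [[1, 0, 1], [1, 0, 0], [1, 1, 1]]

def Spec_findROI (grid : List (List Int)) (out : Option (Int × Int × Int × Int)) : Prop := out = findROI_alt grid
instance (grid : List (List Int)) (out : Option (Int × Int × Int × Int)) : Decidable (Spec_findROI grid out) := by unfold Spec_findROI; infer_instance

-- ===== CLAIM (what is proved, stated in full; the proofs are below) =====
def Claim_equal_findROI : Prop := ∀ (grid : List (List Int)), Dom_findROI grid → Pre_findROI grid → Spec_findROI grid (findROI grid)

-- ===== LEMMAS AND PROOFS =====

-- the DFS never touches tl (coords['tl'])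
theorem dfsA_tl (f : Nat) (r c : Int) (g : List (List Int)) (st : (Int × Int) × (Int × Int)) :
    (dfsA f r c g st).2.1 = st.1 := by
  induction f generalizing r c g st with
  | zero => rfl
  | succ f ih =>
    rw [dfsA]
    split
    · rfl
    · split
      · rfl
      · split
        · rfl
        · simp only [ih]
          split <;> rfl

-- marking a readable cell never increases pvCnt
theorem countP_set_one_le (L : List Int) (k : Nat) :
    (L.set k 1).countP (fun x => x != 1) ≤ L.countP (fun x => x != 1) := by
  induction L generalizing k with
  | nil => simp
  | cons a t ih =>
    cases k with
    | zero =>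
      rw [List.set_cons_zero, List.countP_cons_of_neg (by decide), List.countP_cons]
      exact Nat.le_add_right _ _
    | succ m =>
      simp only [List.set_cons_succ, List.countP_cons]
      exact Nat.add_le_add_right (ih m) _

theorem pvCnt_set_le (g : List (List Int)) (k : Nat) (x : List Int)
    (h : x.countP (fun a => a != 1) ≤ (g.getD k []).countP (fun a => a != 1)) :
    pvCnt (g.set k x) ≤ pvCnt g := by
  induction g generalizing k with
  | nil => simp
  | cons a t ih =>
    cases k with
    | zero =>
      simp only [List.getD_cons_zero] at h
      simp only [List.set_cons_zero, pvCnt, List.map_cons, List.sum_cons]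
      exact Nat.add_le_add_right h _
    | succ m =>
      have := ih m (by simpa using h)
      simp only [List.set_cons_succ, pvCnt, List.map_cons, List.sum_cons] at this ⊢
      exact Nat.add_le_add_left this _

theorem pvCnt_mark_le (g : List (List Int)) (r c : Int) (hr0 : 0 ≤ r)
    (hrl : r < (g.length : Int)) (hc0 : 0 ≤ c) : pvCnt (pvMark g r c) ≤ pvCnt g := by
  have hrn : r.toNat < g.length := by omega
  have hrow : PySem.List.pyGetD g r [] = g[r.toNat] :=
    PySem.List.pyGetD_eq_getElem _ _ hr0 hrl
  have hmark : pvMark g r c = g.set r.toNat ((g[r.toNat]).set c.toNat 1) := by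
    rw [pvMark, hrow, PySem.List.pySetD_of_nonneg _ _ hr0, PySem.List.pySetD_of_nonneg _ _ hc0]
  rw [hmark]
  apply pvCnt_set_le
  rw [List.getD_eq_getElem _ _ hrn]
  exact countP_set_one_le _ _

-- the DFS never increases pvCnt
theorem dfsA_cnt_le (f : Nat) (r c : Int) (g : List (List Int))
    (st : (Int × Int) × (Int × Int)) : pvCnt (dfsA f r c g st).1 ≤ pvCnt g := by
  induction f generalizing r c g st with
  | zero => exact le_refl _
  | succ f ih =>
    rw [dfsA]
    split
    · exact le_refl _
    · split
      · exact le_refl _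
      · split
        · exact le_refl _
        · rename_i h1 h2 _
          dsimp only
          exact le_trans (ih _ _ _ _) (le_trans (ih _ _ _ _) (le_trans (ih _ _ _ _)
            (le_trans (ih _ _ _ _) (pvCnt_mark_le g r c (by omega) (by omega) (by omega)))))

-- a readable non-1 in-bounds cell forces pvCnt > 0
theorem pvCnt_pos (g : List (List Int)) (r c : Int) (hr0 : 0 ≤ r) (hrl : r < (g.length : Int))
    (hc0 : 0 ≤ c) (hv : pvRead g r c ≠ 1) : 0 < pvCnt g :=
  lt_of_le_of_lt (Nat.zero_le _) (pvCnt_mark_lt g r c hr0 hrl hc0 hv)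

-- BRIDGE: popping one cell from B's stack performs exactly one full recursive DFS call of A
theorem bridge (f : Nat) : ∀ (r c : Int) (g : List (List Int)) (st : (Int × Int) × (Int × Int))
    (stack : List (Int × Int)), pvCnt g ≤ f →
    loopB ((r, c) :: stack) g st.2 =
      loopB stack (dfsA (f + 1) r c g st).1 (dfsA (f + 1) r c g st).2.2 := by
  induction f with
  | zero =>
    intro r c g st stack hf
    by_cases hb1 : r < 0 ∨ r > (g.length : Int) - 1
    · conv_lhs => rw [loopB]
      rw [dfsA, if_pos hb1, if_pos (show r < 0 ∨ r ≥ (g.length : Int) ∨ c < 0 ∨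
        c ≥ ((PySem.List.pyGetD g 0 []).length : Int) by omega)]
    · by_cases hb2 : c < 0 ∨ c > ((PySem.List.pyGetD g 0 []).length : Int) - 1
      · conv_lhs => rw [loopB]
        rw [dfsA, if_neg hb1, if_pos hb2, if_pos (show r < 0 ∨ r ≥ (g.length : Int) ∨ c < 0 ∨
          c ≥ ((PySem.List.pyGetD g 0 []).length : Int) by omega)]
      · by_cases hv : pvRead g r c = 1
        · conv_lhs => rw [loopB]
          rw [dfsA, if_neg hb1, if_neg hb2, if_pos hv,
            if_neg (show ¬(r < 0 ∨ r ≥ (g.length : Int) ∨ c < 0 ∨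
              c ≥ ((PySem.List.pyGetD g 0 []).length : Int)) by omega), if_pos hv]
        · have := pvCnt_pos g r c (by omega) (by omega) (by omega) hv
          omega
  | succ f ih =>
    intro r c g st stack hf
    by_cases hb1 : r < 0 ∨ r > (g.length : Int) - 1
    · conv_lhs => rw [loopB]
      rw [dfsA, if_pos hb1, if_pos (show r < 0 ∨ r ≥ (g.length : Int) ∨ c < 0 ∨
        c ≥ ((PySem.List.pyGetD g 0 []).length : Int) by omega)]
    · by_cases hb2 : c < 0 ∨ c > ((PySem.List.pyGetD g 0 []).length : Int) - 1
      · conv_lhs => rw [loopB]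
        rw [dfsA, if_neg hb1, if_pos hb2, if_pos (show r < 0 ∨ r ≥ (g.length : Int) ∨ c < 0 ∨
          c ≥ ((PySem.List.pyGetD g 0 []).length : Int) by omega)]
      · by_cases hv : pvRead g r c = 1
        · conv_lhs => rw [loopB]
          rw [dfsA, if_neg hb1, if_neg hb2, if_pos hv,
            if_neg (show ¬(r < 0 ∨ r ≥ (g.length : Int) ∨ c < 0 ∨
              c ≥ ((PySem.List.pyGetD g 0 []).length : Int)) by omega), if_pos hv]
        · have hcnt1 : pvCnt (pvMark g r c) ≤ f := by
            have := pvCnt_mark_lt g r c (by omega) (by omega) (by omega) hv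
            omega
          conv_lhs => rw [loopB]
          rw [dfsA, if_neg hb1, if_neg hb2, if_neg hv,
            if_neg (show ¬(r < 0 ∨ r ≥ (g.length : Int) ∨ c < 0 ∨
              c ≥ ((PySem.List.pyGetD g 0 []).length : Int)) by omega), if_neg hv]
          dsimp only
          rw [show (if r + c > st.2.1 + st.2.2 then (r, c) else st.2) =
            (if r + c > st.2.1 + st.2.2 then (st.1, (r, c)) else st).2 by split <;> rfl]
          rw [ih (r - 1) c (pvMark g r c)
            (if r + c > st.2.1 + st.2.2 then (st.1, (r, c)) else st)
            ((r + 1, c) :: (r, c + 1) :: (r, c - 1) :: stack) hcnt1]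
          rw [ih (r + 1) c _ _ ((r, c + 1) :: (r, c - 1) :: stack)
            (le_trans (dfsA_cnt_le _ _ _ _ _) hcnt1)]
          rw [ih r (c + 1) _ _ ((r, c - 1) :: stack)
            (le_trans (dfsA_cnt_le _ _ _ _ _) (le_trans (dfsA_cnt_le _ _ _ _ _) hcnt1))]
          rw [ih r (c - 1) _ _ stack
            (le_trans (dfsA_cnt_le _ _ _ _ _) (le_trans (dfsA_cnt_le _ _ _ _ _)
              (le_trans (dfsA_cnt_le _ _ _ _ _) hcnt1)))]

theorem pvCnt_le_sumLen (g : List (List Int)) : pvCnt g ≤ (g.map List.length).sum := by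
  induction g with
  | nil => simp [pvCnt]
  | cons a t ih =>
    simp only [pvCnt, List.map_cons, List.sum_cons] at ih ⊢
    exact Nat.add_le_add List.countP_le_length ih

theorem scanCols_eq (g : List (List Int)) (row : Int) (l : List Int) :
    scanColsA g row l = scanColsB g row l := by
  induction l with
  | nil => rfl
  | cons col rest ih =>
    rw [scanColsA, scanColsB]
    by_cases hread : pvRead g row col = 0
    · rw [if_pos hread, if_pos hread]
      dsimp only
      have hb := bridge ((g.map List.length).sum) row col g ((row, col), (row, col)) []
        (pvCnt_le_sumLen g)
      have hfuel : (g.map List.length).sum + 1 = pvFuel g := rfl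
      rw [hfuel] at hb
      dsimp only at hb
      rw [hb, loopB]
      rw [dfsA_tl (pvFuel g) row col g ((row, col), (row, col))]
    · rw [if_neg hread, if_neg hread]
      exact ih

theorem scanRows_eq (g : List (List Int)) (l : List Int) :
    scanRowsA g l = scanRowsB g l := by
  induction l with
  | nil => rfl
  | cons row rest ih =>
    rw [scanRowsA, scanRowsB, scanCols_eq]
    cases scanColsB g row (PySem.List.pyRange 0 ((PySem.List.pyGetD g 0 []).length : Int) 1) with
    | none => simpa using ih
    | some r => rfl

-- ===== VERDICT (by name: the statement is the Claim_ definition above) =====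
theorem findROI_spec : Claim_equal_findROI := by
  intro grid _ _
  unfold Spec_findROI findROI findROI_alt
  exact scanRows_eq grid _
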